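-- pv_equiv track=rewrite | github.com/lebyanelm/mf_code | encoder.py | _get_required_morse_width
-- ===== SOURCE A (Python) =====
-- COL_WIDTH = 15
--
-- def _get_required_morse_width(morse_codes: tuple) -> int:
--     required_morse_width = 0
--     # calculate the required morse width
--     for morse_code in morse_codes:
--         if morse_code == 0:
--             dash_width = ( COL_WIDTH * 2 )
--             space_width = ( COL_WIDTH * 2 )
--
--             required_morse_width +=  (dash_width + space_width)
--         else:
--             dot_width = COL_WIDTH
--             space_width = COL_WIDTH * 2
--
--             required_morse_width += (dot_width + space_width)
--     return required_morse_width
-- ===== SOURCE B (Python) =====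
-- COL_WIDTH = 15
--
-- def _get_required_morse_width(morse_codes: tuple) -> int:
--     # closed form: every element contributes 3*COL_WIDTH; each zero adds COL_WIDTH more
--     return COL_WIDTH * 3 * len(morse_codes) + COL_WIDTH * list(morse_codes).count(0)
-- ===== Notes on version B (the rewrite author's own statement) =====
-- stated objective: simpler
-- what changed: Replaced the per-element branching loop and accumulator with a closed-form expression 3*COL_WIDTH*len + COL_WIDTH*count(0).
import Mathlib
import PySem

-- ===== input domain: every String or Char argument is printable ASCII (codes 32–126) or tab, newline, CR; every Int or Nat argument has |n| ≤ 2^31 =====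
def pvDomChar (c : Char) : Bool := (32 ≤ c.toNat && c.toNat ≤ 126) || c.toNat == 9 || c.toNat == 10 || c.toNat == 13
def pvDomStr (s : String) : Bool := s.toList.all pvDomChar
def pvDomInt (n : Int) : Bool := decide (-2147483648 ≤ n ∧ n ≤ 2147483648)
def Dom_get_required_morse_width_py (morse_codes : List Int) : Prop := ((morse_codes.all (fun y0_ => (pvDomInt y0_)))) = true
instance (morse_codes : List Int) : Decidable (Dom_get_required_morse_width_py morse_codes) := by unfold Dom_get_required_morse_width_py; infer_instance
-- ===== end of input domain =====

-- ===== PORT A =====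
-- B replaces the loop with a closed-form count expression (simpler).
def get_required_morse_width_py (morse_codes : List Int) : Int :=
  morse_codes.foldl (fun required_morse_width morse_code =>
    if morse_code == 0 then
      required_morse_width + ((15 * 2) + (15 * 2))
    else
      required_morse_width + (15 + 15 * 2)) 0

-- ===== PORT B =====
def get_required_morse_width_py_alt (morse_codes : List Int) : Int :=
  15 * 3 * (morse_codes.length : Int) + 15 * (PySem.List.count morse_codes 0 : Int)

-- ===== PRECONDITION & SPEC =====
def Spec_get_required_morse_width_py (morse_codes : List Int) (out : Int) : Prop := out = get_required_morse_width_py_alt morse_codes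
instance (morse_codes : List Int) (out : Int) : Decidable (Spec_get_required_morse_width_py morse_codes out) := by unfold Spec_get_required_morse_width_py; infer_instance

-- ===== CLAIM (what is proved, stated in full; the proofs are below) =====
def Claim_equal_get_required_morse_width_py : Prop := ∀ (morse_codes : List Int), Dom_get_required_morse_width_py morse_codes → Spec_get_required_morse_width_py morse_codes (get_required_morse_width_py morse_codes)

-- ===== LEMMAS AND PROOFS =====

-- ===== VERDICT (by name: the statement is the Claim_ definition above) =====
theorem pv_loop (morse_codes : List Int) (acc : Int) :
    morse_codes.foldl (fun required_morse_width morse_code =>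
      if morse_code == 0 then
        required_morse_width + ((15 * 2) + (15 * 2))
      else
        required_morse_width + (15 + 15 * 2)) acc
    = acc + 15 * 3 * (morse_codes.length : Int) + 15 * (PySem.List.count morse_codes 0 : Int) := by
  induction morse_codes generalizing acc with
  | nil => simp [PySem.List.count]
  | cons x xs ih =>
    simp only [List.foldl_cons, PySem.List.count, List.count_cons, ih]
    by_cases h : x = 0 <;> simp [h] <;> ring

theorem get_required_morse_width_py_spec : Claim_equal_get_required_morse_width_py := by
  intro morse_codes _
  unfold Spec_get_required_morse_width_py get_required_morse_width_py get_required_morse_width_py_alt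
  rw [pv_loop]; ring
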